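-- pv_equiv track=rewrite | github.com/tamirMoshiashvili/DL_ex2 | part2/utils42.py | get_test_set
-- ===== SOURCE A (Python) =====
-- START = '<s>'
--
-- END = '</s>'
--
-- def get_test_set(file_lines):
--     """
--     NOTE -  each line in file_lines is a single word,
--             this function is for test data.
--     :param file_lines: list of lines, each line is 'word' or ''
--     :return: list of sentences.
--     """
--     sentence = []
--     lines = []
--
--     file_lines.append('')
--     for line in file_lines:
--         if line == '':
--             # start tags
--             sentence.insert(0, START)
--             sentence.insert(0, START)
--
--             # end tags
--             sentence.extend([END, END])
--
--             # insert the current tuple (sentence, tags) and clear the lists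
--             lines.append(sentence)
--             sentence = []
--         else:
--             sentence.append(line.lower())   # lower cased
--     return lines
-- ===== SOURCE B (Python) =====
-- START = '<s>'
--
-- END = '</s>'
--
-- def get_test_set(file_lines):
--     file_lines.append('')
--     boundaries = [i for i, l in enumerate(file_lines) if l == '']
--     lines = []
--     prev = 0
--     for b in boundaries:
--         words = [w.lower() for w in file_lines[prev:b]]
--         lines.append([START, START] + words + [END, END])
--         prev = b + 1
--     return lines
-- ===== Notes on version B (the rewrite author's own statement) =====
-- stated objective: alternative
-- what changed: B first builds an index of all empty-line boundaries, then materialises each sentence by slicing between consecutive boundaries, instead of A's single accumulating loop with insert(0)/extend; both keep the file_lines.append('') mutation.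
import Mathlib
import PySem

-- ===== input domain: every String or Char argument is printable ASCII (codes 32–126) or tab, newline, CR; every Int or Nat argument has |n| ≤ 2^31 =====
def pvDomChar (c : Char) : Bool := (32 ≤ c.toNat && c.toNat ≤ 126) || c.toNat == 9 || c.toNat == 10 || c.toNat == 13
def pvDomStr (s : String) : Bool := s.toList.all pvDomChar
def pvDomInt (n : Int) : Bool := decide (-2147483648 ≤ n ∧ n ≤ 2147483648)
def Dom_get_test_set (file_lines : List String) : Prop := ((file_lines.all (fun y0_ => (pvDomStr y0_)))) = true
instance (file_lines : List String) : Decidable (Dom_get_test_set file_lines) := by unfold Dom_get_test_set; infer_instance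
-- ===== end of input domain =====

-- B rebuilds the result by indexing all empty-line boundaries first and slicing between
-- them, instead of A's single accumulating loop; equivalence is about the RETURN value
-- (both Pythons also perform the same file_lines.append('') mutation).

-- ===== PORT A =====
-- single pass: state = (current sentence, finished sentences)
def get_test_set (file_lines : List String) : List (List String) :=
  ((file_lines ++ [""]).foldl
    (fun (st : List String × List (List String)) line =>
      if line == "" then
        ([], st.2 ++ [("<s>" :: "<s>" :: st.1) ++ ["</s>", "</s>"]])
      else
        (st.1 ++ [PySem.Str.lower line], st.2))
    ([], [])).2

-- ===== PORT B =====
-- boundaries-first: indices of empty lines, then slice between consecutive boundaries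
def get_test_set_alt (file_lines : List String) : List (List String) :=
  let fl := file_lines ++ [""]
  let boundaries := ((PySem.List.enumerate fl 0).filter (fun p => p.2 == "")).map Prod.fst
  (boundaries.foldl
    (fun (st : List (List String) × Int) b =>
      let words := (PySem.List.slice fl (some st.2) (some b)).map PySem.Str.lower
      (st.1 ++ [["<s>", "<s>"] ++ words ++ ["</s>", "</s>"]], b + 1))
    ([], 0)).1

-- ===== PRECONDITION & SPEC =====
def Spec_get_test_set (file_lines : List String) (out : List (List String)) : Prop := out = get_test_set_alt file_lines
instance (file_lines : List String) (out : List (List String)) : Decidable (Spec_get_test_set file_lines out) := by unfold Spec_get_test_set; infer_instance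

-- ===== CLAIM (what is proved, stated in full; the proofs are below) =====
def Claim_equal_get_test_set : Prop := ∀ (file_lines : List String), Dom_get_test_set file_lines → Spec_get_test_set file_lines (get_test_set file_lines)

-- ===== LEMMAS AND PROOFS =====

-- common characterisation: sentences of l given a pending (already lowered) prefix
def sentsFrom (sent : List String) : List String → List (List String)
  | [] => []
  | l :: rest =>
    if l == "" then (["<s>", "<s>"] ++ sent ++ ["</s>", "</s>"]) :: sentsFrom [] rest
    else sentsFrom (sent ++ [PySem.Str.lower l]) rest

theorem a_loop (l : List String) (sent : List String) (acc : List (List String)) :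
    (l.foldl
      (fun (st : List String × List (List String)) line =>
        if line == "" then
          ([], st.2 ++ [("<s>" :: "<s>" :: st.1) ++ ["</s>", "</s>"]])
        else
          (st.1 ++ [PySem.Str.lower line], st.2))
      (sent, acc)).2 = acc ++ sentsFrom sent l := by
  induction l generalizing sent acc with
  | nil => simp [sentsFrom]
  | cons x rest ih =>
    by_cases hx : x = ""
    · subst hx
      simp only [List.foldl_cons, beq_self_eq_true, if_true, sentsFrom]
      rw [ih]
      simp
    · have hbx : (x == "") = false := by simp [hx]
      simp only [List.foldl_cons, hbx, Bool.false_eq_true, if_false, sentsFrom]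
      rw [ih]

theorem b_loop (l pend : List String) (prev : Nat) (fl : List String)
    (acc : List (List String))
    (hdrop : fl.drop prev = pend ++ l) :
    ((((PySem.List.enumerate l ((prev + pend.length : Nat) : Int)).filter
        (fun p => p.2 == "")).map Prod.fst).foldl
      (fun (st : List (List String) × Int) b =>
        let words := (PySem.List.slice fl (some st.2) (some b)).map PySem.Str.lower
        (st.1 ++ [["<s>", "<s>"] ++ words ++ ["</s>", "</s>"]], b + 1))
      (acc, (prev : Int))).1 = acc ++ sentsFrom (pend.map PySem.Str.lower) l := by
  induction l generalizing pend prev acc with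
  | nil => simp [PySem.List.enumerate, sentsFrom]
  | cons x rest ih =>
    rw [PySem.List.enumerate_cons]
    by_cases hx : x = ""
    · subst hx
      have hk : ((prev + pend.length : Nat) : Int) + 1
          = (((prev + pend.length + 1 : Nat) : Nat) : Int) := by push_cast; ring
      have hslice : PySem.List.slice fl (some (prev : Int))
          (some ((prev + pend.length : Nat) : Int)) = pend := by
        have := PySem.List.slice_natCast fl prev (prev + pend.length)
        rw [this, hdrop]
        simp
      have hdrop' : fl.drop (prev + pend.length + 1) = [] ++ rest := by
        have : fl.drop (prev + pend.length + 1)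
            = (fl.drop prev).drop (pend.length + 1) := by
          rw [List.drop_drop]; ring_nf
        rw [this, hdrop]
        simp
      simp only [List.filter_cons, beq_self_eq_true, if_true, List.map_cons,
        List.foldl_cons, sentsFrom]
      rw [hslice]
      have := ih [] (prev + pend.length + 1)
        (acc ++ [["<s>", "<s>"] ++ pend.map PySem.Str.lower ++ ["</s>", "</s>"]]) hdrop'
      simp only [List.map_nil, List.length_nil, Nat.add_zero] at this
      rw [hk]
      simpa [List.append_assoc] using this
    · have hdrop' : fl.drop prev = (pend ++ [x]) ++ rest := by
        rw [hdrop]; simp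
      have hk : ((prev + pend.length : Nat) : Int) + 1
          = ((prev + (pend ++ [x]).length : Nat) : Int) := by
        simp; ring
      have hbx : (x == "") = false := by simp [hx]
      simp only [List.filter_cons, hbx, if_false, Bool.false_eq_true, sentsFrom,
        if_false]
      rw [hk]
      have := ih (pend ++ [x]) prev acc hdrop'
      simpa [sentsFrom, hx] using this

-- ===== VERDICT (by name: the statement is the Claim_ definition above) =====
theorem get_test_set_spec : Claim_equal_get_test_set := by
  intro file_lines _
  unfold Spec_get_test_set get_test_set get_test_set_alt
  rw [a_loop]
  have := b_loop (file_lines ++ [""]) [] 0 (file_lines ++ [""]) [] (by simp)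
  simp only [List.length_nil, Nat.add_zero, Nat.cast_zero, List.map_nil,
    List.nil_append] at this
  rw [this]
  simp
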